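-- pv_equiv track=rewrite | github.com/schinwald/sorter-demo | main.py | algToString
-- ===== SOURCE A (Python) =====
-- def algToString(alg):
--     string = ""
--
--     for i, v in enumerate(alg):
--
--         valg = "".join([str(i+1), ". ", v])
--
--         if i % 3 == 0:
--             string = "".join([string, f"   |  {valg:^19}"])
--         elif i % 3 == 1:
--             string = "".join([string, f"{valg:^19}"])
--         elif i % 3 == 2:
--             string = "".join([string, f"{valg:^19}  |"])
--             if i != len(alg) - 1:
--                 string = "".join([string, "\n"])
--
--     leftOver = -(i % 3) + 2
--     if leftOver != 0:
--         string = "".join([string, leftOver * " " * 19, "  |"])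
--
--     return string
-- ===== SOURCE B (Python) =====
-- def algToString(alg):
--     rows = []
--     for start in range(0, len(alg), 3):
--         chunk = alg[start:start + 3]
--         cells = "".join(f"{f'{start + j + 1}. {v}':^19}" for j, v in enumerate(chunk))
--         rows.append("   |  " + cells + (3 - len(chunk)) * 19 * " " + "  |")
--     return "\n".join(rows)
-- ===== Notes on version B (the rewrite author's own statement) =====
-- stated objective: faster
-- what changed: B builds the table row by row over chunks of three (prefix, centered cells, missing-column padding, closing bar) and joins the rows once at the end, instead of A's single character-stream fold over enumerate with modulo-3 branching that re-joins the whole accumulated string at every element, plus a post-loop leftover fix-up.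
import Mathlib
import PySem

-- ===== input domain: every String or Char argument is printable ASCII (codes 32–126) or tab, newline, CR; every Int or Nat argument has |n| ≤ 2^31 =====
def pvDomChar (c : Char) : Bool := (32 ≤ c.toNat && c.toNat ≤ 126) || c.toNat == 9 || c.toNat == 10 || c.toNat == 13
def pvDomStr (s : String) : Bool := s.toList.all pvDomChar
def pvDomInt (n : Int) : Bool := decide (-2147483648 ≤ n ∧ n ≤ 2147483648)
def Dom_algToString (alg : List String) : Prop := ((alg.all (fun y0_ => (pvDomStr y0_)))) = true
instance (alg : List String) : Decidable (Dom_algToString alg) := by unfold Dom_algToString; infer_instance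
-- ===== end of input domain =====

-- B formats the table row by row over chunks of three and joins the rows, instead of
-- A's single character-stream fold with modulo-3 branching and a post-loop leftover fix-up.

-- shared formatting primitives (the Python f-string pieces both programs use)
-- f"{s:^19}": exact port of Python's '^' format spec (extra pad char goes to the right)
def pvCenter19 (s : List Char) : List Char :=
  if 19 ≤ s.length then s
  else
    let pad := 19 - s.length
    List.replicate (pad / 2) ' ' ++ s ++ List.replicate (pad - pad / 2) ' '

-- the cell text f"{i+1}. {v}" for 0-based index i
def pvValg (i : Nat) (v : String) : List Char :=
  (PySem.Int.toStr ((i : Int) + 1)).toList ++ ". ".toList ++ v.toList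

-- ===== PORT A =====
-- the enumerate loop of A: index i, value v, string accumulator; branches in source order
def pvAGo (i : Nat) (acc : List Char) : List String → List Char
  | [] => acc
  | v :: rest =>
    let c := pvCenter19 (pvValg i v)
    if i % 3 == 0 then pvAGo (i + 1) (acc ++ "   |  ".toList ++ c) rest
    else if i % 3 == 1 then pvAGo (i + 1) (acc ++ c) rest
    else
      -- i % 3 == 2: close the row; "i != len(alg)-1" holds iff elements remain
      pvAGo (i + 1) (acc ++ c ++ "  |".toList ++ (if rest.isEmpty then [] else ['\n'])) rest

def algToString (alg : List String) : String :=
  let body := pvAGo 0 [] alg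
  let i := alg.length - 1          -- value of the loop variable after the loop (alg ≠ [])
  let leftOver := 2 - i % 3        -- -(i % 3) + 2, nonnegative
  String.ofList (if leftOver ≠ 0 then body ++ List.replicate (leftOver * 19) ' ' ++ "  |".toList else body)

-- ===== PORT B =====
-- one table row: prefix, the centered cells of the chunk, missing-column padding, closing bar
def pvBRow (start : Nat) (chunk : List String) : List Char :=
  "   |  ".toList
    ++ (chunk.zipIdx.map (fun p => pvCenter19 (pvValg (start + p.2) p.1))).flatten
    ++ List.replicate ((3 - chunk.length) * 19) ' '
    ++ "  |".toList

-- the rows, chunk by chunk of three (Source B's range(0, len(alg), 3) loop)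
def pvBRows (start : Nat) : List String → List (List Char)
  | [] => []
  | [v] => [pvBRow start [v]]
  | [v, w] => [pvBRow start [v, w]]
  | v :: w :: x :: rest => pvBRow start [v, w, x] :: pvBRows (start + 3) rest

def algToString_alt (alg : List String) : String :=
  String.ofList (List.intercalate ['\n'] (pvBRows 0 alg))

-- ===== PRECONDITION & SPEC =====
-- A raises UnboundLocalError on the empty list (loop variable i unset after the loop); excluded.
def Pre_algToString (alg : List String) : Prop := alg ≠ []
instance (alg : List String) : Decidable (Pre_algToString alg) := by unfold Pre_algToString; infer_instance
def pvWitness_algToString : List String := (["a"])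

def Spec_algToString (alg : List String) (out : String) : Prop := out = algToString_alt alg
instance (alg : List String) (out : String) : Decidable (Spec_algToString alg out) := by unfold Spec_algToString; infer_instance

-- ===== CLAIM (what is proved, stated in full; the proofs are below) =====
def Claim_equal_algToString : Prop := ∀ (alg : List String), Dom_algToString alg → Pre_algToString alg → Spec_algToString alg (algToString alg)

-- ===== LEMMAS AND PROOFS =====

-- the loop accumulator only ever receives appends
theorem pvAGo_acc_gen (l : List String) : ∀ (i : Nat) (acc₁ acc₂ : List Char),
    pvAGo i (acc₁ ++ acc₂) l = acc₁ ++ pvAGo i acc₂ l := by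
  induction l with
  | nil => intro i acc₁ acc₂; simp [pvAGo]
  | cons v rest ih =>
    intro i acc₁ acc₂
    simp only [pvAGo]
    split_ifs <;> (simp only [List.append_assoc]; exact ih _ _ _)

theorem pvAGo_acc (l : List String) (i : Nat) (acc : List Char) :
    pvAGo i acc l = acc ++ pvAGo i [] l := by
  have h := pvAGo_acc_gen l i acc []
  simpa using h

-- A's post-loop leftover piece, as a function of the last index
def pvLeft (i : Nat) : List Char :=
  if 2 - i % 3 ≠ 0 then List.replicate ((2 - i % 3) * 19) ' ' ++ "  |".toList else []

theorem intercalate_cons_ne_nil (sep a : List Char) (l : List (List Char)) (h : l ≠ []) :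
    List.intercalate sep (a :: l) = a ++ sep ++ List.intercalate sep l := by
  cases l with
  | nil => exact absurd rfl h
  | cons b t => simp [List.intercalate, List.intersperse]

-- one full row of A's loop, peeled in one step
set_option maxHeartbeats 2000000 in
theorem pvAGo_step3 (start : Nat) (hs : start % 3 = 0) (v w x : String) (rest : List String) :
    pvAGo start [] (v :: w :: x :: rest) =
      "   |  ".toList ++ pvCenter19 (pvValg start v) ++ pvCenter19 (pvValg (start + 1) w)
        ++ pvCenter19 (pvValg (start + 2) x) ++ "  |".toList
        ++ (if rest.isEmpty then [] else ['\n']) ++ pvAGo (start + 3) [] rest := by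
  have h0 : (start % 3 == 0) = true := by simp [hs]
  have a1 : ((start + 1) % 3 == 0) = false := by simp; omega
  have b1 : ((start + 1) % 3 == 1) = true := by simp; omega
  have a2 : ((start + 1 + 1) % 3 == 0) = false := by simp; omega
  have b2 : ((start + 1 + 1) % 3 == 1) = false := by simp; omega
  have e2 : start + 1 + 1 = start + 2 := by omega
  have e3 : start + 1 + 1 + 1 = start + 3 := by omega
  simp only [pvAGo, h0, a1, b1, a2, b2, if_true, if_false, Bool.false_eq_true, List.nil_append]
  rw [pvAGo_acc, e2, e3]

set_option maxHeartbeats 2000000 in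
theorem pv_main : ∀ (n : Nat) (l : List String), l.length ≤ n → l ≠ [] → ∀ (start : Nat), start % 3 = 0 →
    pvAGo start [] l ++ pvLeft (start + l.length - 1) = List.intercalate ['\n'] (pvBRows start l) := by
  intro n
  induction n with
  | zero =>
    intro l hlen hne
    cases l with
    | nil => exact absurd rfl hne
    | cons v rest => simp at hlen
  | succ n ih =>
    intro l hlen hne start hs
    have h0 : (start % 3 == 0) = true := by simp [hs]
    have h1 : ((start + 1) % 3 == 0) = false := by simp; omega
    have h1' : ((start + 1) % 3 == 1) = true := by simp; omega
    have h2 : ((start + 2) % 3 == 0) = false := by simp; omega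
    have h2' : ((start + 2) % 3 == 1) = false := by simp; omega
    match l with
    | [v] =>
      have e1 : start + 1 - 1 = start := by omega
      simp [pvAGo, pvBRows, pvBRow, pvLeft, h0, e1, hs, List.zipIdx, List.intercalate]
    | [v, w] =>
      have e2 : start + 2 - 1 = start + 1 := by omega
      have em : (start + 1) % 3 = 1 := by omega
      simp [pvAGo, pvBRows, pvBRow, pvLeft, h0, h1, h1', e2, em, List.zipIdx, List.intercalate,
            List.append_assoc]
    | [v, w, x] =>
      have e3 : start + 3 - 1 = start + 2 := by omega
      have em : (start + 2) % 3 = 2 := by omega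
      simp [pvAGo, pvBRows, pvBRow, pvLeft, h0, h1, h1', h2, h2', e3, em, List.zipIdx,
            List.intercalate, List.append_assoc]
    | v :: w :: x :: r :: rs =>
      have hlen' : (r :: rs).length ≤ n := by simp at hlen ⊢; omega
      have hs' : (start + 3) % 3 = 0 := by omega
      have ihr := ih (r :: rs) hlen' (by simp) (start + 3) hs'
      have hrows : pvBRows (start + 3) (r :: rs) ≠ [] := by
        cases rs with
        | nil => simp [pvBRows]
        | cons b t => cases t with
          | nil => simp [pvBRows]
          | cons c u => simp [pvBRows]
      have elen : start + (v :: w :: x :: r :: rs).length - 1 = start + 3 + (r :: rs).length - 1 := by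
        simp; omega
      rw [pvAGo_step3 start hs, elen]
      simp only [pvBRows]
      rw [intercalate_cons_ne_nil _ _ _ hrows]
      simp only [List.isEmpty_cons, Bool.false_eq_true, if_false, List.append_assoc]
      rw [ihr]
      simp [pvBRow, List.zipIdx, List.append_assoc]

-- ===== VERDICT (by name: the statement is the Claim_ definition above) =====
theorem algToString_spec : Claim_equal_algToString := by
  unfold Claim_equal_algToString
  intro alg _ hpre
  have key := pv_main alg.length alg le_rfl hpre 0 rfl
  simp only [Nat.zero_add] at key
  unfold Spec_algToString algToString algToString_alt
  rw [← key]
  unfold pvLeft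
  show String.ofList (if 2 - (alg.length - 1) % 3 ≠ 0 then
      pvAGo 0 [] alg ++ List.replicate ((2 - (alg.length - 1) % 3) * 19) ' ' ++ "  |".toList
    else pvAGo 0 [] alg) = _
  congr 1
  split_ifs with h
  · rw [List.append_assoc]
  · rw [List.append_nil]
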